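-- pv_equiv track=rewrite | github.com/efficacy/aoc2020 | day06/day06.py | count_group
-- ===== SOURCE A (Python) =====
-- def count_group(group, qpart):
--     matched = set()
--     if qpart == 1:
--         for entry in group:
--             for c in entry:
--                 matched.update(c)
--     else:
--         matched.update(set(list("abcdefghijklmnopqrstuvwxyz")))
--         for entry in group:
--             matched = matched.intersection(set(list(entry)))
--
--     return len(matched)
-- ===== SOURCE B (Python) =====
-- def count_group(group, qpart):
--     counts = {}
--     for entry in group:
--         for c in set(entry):
--             counts[c] = counts.get(c, 0) + 1
--     if qpart == 1:
--         return len(counts)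
--     return sum(1 for c in "abcdefghijklmnopqrstuvwxyz" if counts.get(c, 0) == len(group))
-- ===== Notes on version B (the rewrite author's own statement) =====
-- stated objective: alternative
-- what changed: Replaces the set union/intersection folds with a single per-letter frequency table (one dict built once); part 1 is the table's size and part 2 counts the a-z letters whose frequency equals the group size.
import Mathlib
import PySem

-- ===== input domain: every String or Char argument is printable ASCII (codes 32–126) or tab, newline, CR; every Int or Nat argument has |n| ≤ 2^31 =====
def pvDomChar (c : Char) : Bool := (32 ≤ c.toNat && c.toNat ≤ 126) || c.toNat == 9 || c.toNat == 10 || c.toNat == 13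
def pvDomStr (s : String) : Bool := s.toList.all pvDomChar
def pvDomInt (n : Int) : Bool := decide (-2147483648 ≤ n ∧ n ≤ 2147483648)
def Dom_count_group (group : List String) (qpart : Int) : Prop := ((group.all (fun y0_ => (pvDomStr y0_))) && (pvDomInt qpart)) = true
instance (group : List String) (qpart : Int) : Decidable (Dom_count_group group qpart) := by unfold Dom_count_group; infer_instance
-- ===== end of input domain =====

-- B replaces A's set union/intersection folds by one per-letter frequency dict (alternative, not faster).

-- ===== PORT A =====
def count_group (group : List String) (qpart : Int) : Int :=
  let matched : PySem.Set Char := PySem.Set.empty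
  if qpart == 1 then
    -- for entry in group: for c in entry: matched.update(c)  (c is a 1-char string; update adds its char)
    let matched := group.foldl (fun m e => e.toList.foldl (fun m c => PySem.Set.add m c) m) matched
    (matched.length : Int)
  else
    let matched := PySem.Set.update matched (PySem.Set.ofList "abcdefghijklmnopqrstuvwxyz".toList)
    let matched := group.foldl (fun m e => PySem.Set.inter m (PySem.Set.ofList e.toList)) matched
    (matched.length : Int)

-- ===== PORT B =====
def count_group_alt (group : List String) (qpart : Int) : Int :=
  let counts : PySem.Dict Char Int :=
    group.foldl (fun d e => (PySem.Set.ofList e.toList).foldl (fun d c => d.modify c 0 (· + 1)) d) PySem.Dict.empty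
  if qpart == 1 then
    (counts.size : Int)
  else
    "abcdefghijklmnopqrstuvwxyz".toList.foldl
      (fun acc c => acc + (if counts.getD c 0 == (group.length : Int) then 1 else 0)) 0

-- ===== PRECONDITION & SPEC =====
def Spec_count_group (group : List String) (qpart : Int) (out : Int) : Prop := out = count_group_alt group qpart
instance (group : List String) (qpart : Int) (out : Int) : Decidable (Spec_count_group group qpart out) := by unfold Spec_count_group; infer_instance

-- ===== CLAIM (what is proved, stated in full; the proofs are below) =====
def Claim_equal_count_group : Prop := ∀ (group : List String) (qpart : Int), Dom_count_group group qpart → Spec_count_group group qpart (count_group group qpart)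

-- ===== LEMMAS AND PROOFS =====

-- all distinct chars of the group, one copy per entry that contains them (B's counter is over this list)
def pvFlat (group : List String) : List Char := group.flatMap (fun e => PySem.Set.ofList e.toList)

theorem pv_mem_updateFold (group : List String) (x : Char) : ∀ s : PySem.Set Char,
    (x ∈ group.foldl (fun m e => e.toList.foldl (fun m c => PySem.Set.add m c) m) s)
      ↔ (x ∈ s ∨ ∃ e ∈ group, x ∈ e.toList) := by
  induction group with
  | nil => simp
  | cons e es ih =>
    intro s
    rw [List.foldl_cons, ih]
    have : e.toList.foldl (fun m c => PySem.Set.add m c) s = PySem.Set.update s e.toList := rfl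
    rw [this]
    simp only [PySem.Set.mem_update, List.mem_cons]
    constructor
    · rintro ((h | h) | ⟨e', he', hx⟩)
      · exact Or.inl h
      · exact Or.inr ⟨e, Or.inl rfl, h⟩
      · exact Or.inr ⟨e', Or.inr he', hx⟩
    · rintro (h | ⟨e', (rfl | he'), hx⟩)
      · exact Or.inl (Or.inl h)
      · exact Or.inl (Or.inr hx)
      · exact Or.inr ⟨e', he', hx⟩

theorem pv_nodup_updateFold (group : List String) : ∀ s : PySem.Set Char, s.Nodup →
    (group.foldl (fun m e => e.toList.foldl (fun m c => PySem.Set.add m c) m) s).Nodup := by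
  induction group with
  | nil => intro s hs; simpa using hs
  | cons e es ih =>
    intro s hs
    rw [List.foldl_cons]
    have : e.toList.foldl (fun m c => PySem.Set.add m c) s = PySem.Set.update s e.toList := rfl
    rw [this]
    exact ih _ (PySem.Set.nodup_update s e.toList hs)

theorem pv_counts_eq (group : List String) :
    group.foldl (fun d e => (PySem.Set.ofList e.toList).foldl (fun d c => d.modify c 0 (· + 1)) d)
        PySem.Dict.empty
      = PySem.Dict.counter (pvFlat group) := by
  rw [PySem.Dict.counter_eq_foldl, pvFlat, List.foldl_flatMap]

theorem pv_count_nodup {l : List Char} (hl : l.Nodup) (c : Char) :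
    l.count c = if c ∈ l then 1 else 0 := by
  split_ifs with h
  · have h1 : l.count c ≤ 1 := List.nodup_iff_count_le_one.mp hl c
    have h2 : 0 < l.count c := List.count_pos_iff.mpr h
    omega
  · exact List.count_eq_zero.mpr h

theorem pv_count_flat (group : List String) (c : Char) :
    (pvFlat group).count c = group.countP (fun e => decide (c ∈ e.toList)) := by
  induction group with
  | nil => rfl
  | cons e es ih =>
    rw [pvFlat, List.flatMap_cons, List.count_append, List.countP_cons, ← pvFlat, ih,
      pv_count_nodup (PySem.Set.nodup_ofList e.toList) c]
    simp only [PySem.Set.mem_ofList]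
    by_cases h : c ∈ e.toList <;> simp [h]
    omega

theorem pv_interFold (group : List String) : ∀ s : PySem.Set Char,
    group.foldl (fun m e => PySem.Set.inter m (PySem.Set.ofList e.toList)) s
      = s.filter (fun c => group.all (fun e => decide (c ∈ e.toList))) := by
  induction group with
  | nil => intro s; simp
  | cons e es ih =>
    intro s
    rw [List.foldl_cons, ih]
    show (List.filter _ s).filter _ = _
    rw [List.filter_filter]
    apply List.filter_congr
    intro c _
    simp [PySem.Set.mem_ofList, Bool.and_comm]

theorem pv_foldl_count (q : Char → Bool) (l : List Char) : ∀ acc : Int,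
    l.foldl (fun acc c => acc + (if q c then 1 else 0)) acc = acc + (l.countP q : Int) := by
  induction l with
  | nil => simp
  | cons c cs ih =>
    intro acc
    rw [List.foldl_cons, ih, List.countP_cons]
    by_cases h : q c = true <;> simp [h] <;> try ring

-- ===== VERDICT (by name: the statement is the Claim_ definition above) =====
theorem count_group_spec : Claim_equal_count_group := by
  intro group qpart _
  unfold Spec_count_group count_group count_group_alt
  simp only [pv_counts_eq]
  by_cases h : (qpart == 1) = true
  · simp only [h, if_true]
    have hk : (PySem.Dict.counter (pvFlat group)).size
        = (PySem.Set.ofList (pvFlat group)).length := by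
      have := PySem.Dict.keys_counter (pvFlat group)
      simp only [PySem.Dict.size, PySem.Dict.keys] at this ⊢
      rw [← this, List.length_map]
    rw [hk]
    congr 1
    have hperm : (group.foldl (fun m e => e.toList.foldl (fun m c => PySem.Set.add m c) m)
        PySem.Set.empty).Perm (PySem.Set.ofList (pvFlat group)) := by
      rw [List.perm_ext_iff_of_nodup
        (pv_nodup_updateFold group PySem.Set.empty List.nodup_nil)
        (PySem.Set.nodup_ofList _)]
      intro a
      rw [pv_mem_updateFold, PySem.Set.mem_ofList, pvFlat, List.mem_flatMap]
      simp [PySem.Set.mem_ofList, PySem.Set.empty]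
    exact hperm.length_eq
  · simp only [h]
    have halpha : PySem.Set.update PySem.Set.empty
        (PySem.Set.ofList "abcdefghijklmnopqrstuvwxyz".toList)
        = "abcdefghijklmnopqrstuvwxyz".toList := by
      rw [show (PySem.Set.empty : PySem.Set Char) = [] from rfl, PySem.Set.update_nil_left,
        PySem.Set.ofList_ofList, PySem.Set.ofList_eq_self_of_nodup _ (by decide)]
    rw [halpha, pv_interFold, pv_foldl_count]
    have hq : ∀ c : Char, ((PySem.Dict.counter (pvFlat group)).getD c 0 == (group.length : Int))
        = group.all (fun e => decide (c ∈ e.toList)) := by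
      intro c
      rw [PySem.Dict.getD_counter, pv_count_flat]
      by_cases hall : ∀ e ∈ group, decide (c ∈ e.toList) = true
      · have : group.countP (fun e => decide (c ∈ e.toList)) = group.length :=
          List.countP_eq_length.mpr hall
        rw [this, beq_self_eq_true]
        exact (List.all_eq_true.mpr hall).symm
      · have hne : group.countP (fun e => decide (c ∈ e.toList)) ≠ group.length := by
          intro hc; exact hall (List.countP_eq_length.mp hc)
        have : ((group.countP (fun e => decide (c ∈ e.toList)) : Int) == (group.length : Int)) = false := by
          simp [hne]
        have hb : group.all (fun e => decide (c ∈ e.toList)) = false := by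
          rw [← Bool.not_eq_true, List.all_eq_true]; exact hall
        rw [hb, beq_eq_false_iff_ne]
        exact fun hc => hne (by exact_mod_cast hc)
    simp only [hq]
    rw [zero_add, List.countP_eq_length_filter]
    rfl
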